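-- pv_equiv track=rewrite | github.com/maximyuss/Yandex | training-6.0/6-2f.py | task_6_2_f
-- ===== SOURCE A (Python) =====
-- def task_6_2_f(n, nums):
--     res, M = 0, 1000000007
--     suff = [0] * n
--     summ = nums[n - 1]
--     for i in range(n - 2, 0, -1):
--         suff[i] = summ * nums[i] + suff[i + 1]
--         summ += nums[i]
--     for l in range(n - 2):
--         calc = nums[l] * suff[l + 1]
--         res = res + calc
--     return res % M
-- ===== SOURCE B (Python) =====
-- def task_6_2_f(n, nums):
--     # single forward pass maintaining elementary symmetric sums e1, e2, e3
--     e1 = e2 = e3 = 0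
--     for i in range(n):
--         x = nums[i]
--         e3 += e2 * x
--         e2 += e1 * x
--         e1 += x
--     return e3 % 1000000007
-- ===== Notes on version B (the rewrite author's own statement) =====
-- stated objective: simpler
-- what changed: Replaced the suffix-pair-sum array and two separate index loops with a single forward pass maintaining the elementary symmetric sums e1, e2, e3 (no auxiliary array).
import Mathlib
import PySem

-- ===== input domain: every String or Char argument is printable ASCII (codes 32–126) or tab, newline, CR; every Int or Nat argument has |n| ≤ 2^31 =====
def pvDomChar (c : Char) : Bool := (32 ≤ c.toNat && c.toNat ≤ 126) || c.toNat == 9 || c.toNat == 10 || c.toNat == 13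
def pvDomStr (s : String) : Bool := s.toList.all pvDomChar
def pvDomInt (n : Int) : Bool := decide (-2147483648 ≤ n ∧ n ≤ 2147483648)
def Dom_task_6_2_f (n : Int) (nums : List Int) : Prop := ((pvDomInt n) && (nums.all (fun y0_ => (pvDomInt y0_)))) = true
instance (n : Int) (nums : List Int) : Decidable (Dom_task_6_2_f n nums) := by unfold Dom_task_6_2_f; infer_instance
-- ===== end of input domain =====

-- B replaces A's suffix-pair-sum array and two separate index loops by one forward pass
-- maintaining the elementary symmetric sums e1, e2, e3 (objective: simpler, no auxiliary array).

-- ===== PORT A =====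
def task_6_2_f (n : Int) (nums : List Int) : Int :=
  let M : Int := 1000000007
  let suff : List Int := List.replicate n.toNat 0        -- [0] * n  ([] for n ≤ 0, as in Python)
  let summ : Int := PySem.List.pyGetD nums (n - 1) 0     -- nums[n-1]; in range under Pre_
  let st : List Int × Int :=
    (PySem.List.pyRange (n - 2) 0 (-1)).foldl
      (fun st i =>
        (PySem.List.pySetD st.1 i
            (st.2 * PySem.List.pyGetD nums i 0 + PySem.List.pyGetD st.1 (i + 1) 0),
         st.2 + PySem.List.pyGetD nums i 0))
      (suff, summ)
  let res : Int :=
    (PySem.List.pyRange 0 (n - 2) 1).foldl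
      (fun res l => res + PySem.List.pyGetD nums l 0 * PySem.List.pyGetD st.1 (l + 1) 0) 0
  PySem.Int.mod res M

-- ===== PORT B =====
def task_6_2_f_alt (n : Int) (nums : List Int) : Int :=
  let st : Int × Int × Int :=
    (PySem.List.pyRange 0 n 1).foldl
      (fun st i =>
        let x := PySem.List.pyGetD nums i 0              -- nums[i]; in range under Pre_
        (st.1 + x, st.2.1 + st.1 * x, st.2.2 + st.2.1 * x))
      (0, 0, 0)
  PySem.Int.mod st.2.2 1000000007

-- ===== PRECONDITION & SPEC =====
-- Pre_: nums[n-1] must be a valid Python index (A raises IndexError otherwise);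
-- this also makes every other index access of both programs in range.
def Pre_task_6_2_f (n : Int) (nums : List Int) : Prop :=
  PySem.Raise.InRange nums.length (n - 1)
instance (n : Int) (nums : List Int) : Decidable (Pre_task_6_2_f n nums) := by
  unfold Pre_task_6_2_f; infer_instance

def pvWitness_task_6_2_f : Int × List Int := (4, [1, 2, 3, 4])

def Spec_task_6_2_f (n : Int) (nums : List Int) (out : Int) : Prop := out = task_6_2_f_alt n nums
instance (n : Int) (nums : List Int) (out : Int) : Decidable (Spec_task_6_2_f n nums out) := by unfold Spec_task_6_2_f; infer_instance

-- ===== CLAIM (what is proved, stated in full; the proofs are below) =====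
def Claim_equal_task_6_2_f : Prop := ∀ (n : Int) (nums : List Int), Dom_task_6_2_f n nums → Pre_task_6_2_f n nums → Spec_task_6_2_f n nums (task_6_2_f n nums)

-- ===== LEMMAS AND PROOFS =====

-- elementary symmetric sums of a list, head recursion
def pvE1 : List Int → Int
  | [] => 0
  | x :: xs => x + pvE1 xs
def pvE2 : List Int → Int
  | [] => 0
  | x :: xs => x * pvE1 xs + pvE2 xs
def pvE3 : List Int → Int
  | [] => 0
  | x :: xs => x * pvE2 xs + pvE3 xs

theorem pvE1_append (xs : List Int) (y : Int) : pvE1 (xs ++ [y]) = pvE1 xs + y := by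
  induction xs with
  | nil => simp [pvE1]
  | cons a as ih => simp [pvE1, ih]; ring

theorem pvE2_append (xs : List Int) (y : Int) : pvE2 (xs ++ [y]) = pvE2 xs + pvE1 xs * y := by
  induction xs with
  | nil => simp [pvE1, pvE2]
  | cons a as ih => simp [pvE1, pvE2, pvE1_append, ih]; ring

theorem pvE3_append (xs : List Int) (y : Int) : pvE3 (xs ++ [y]) = pvE3 xs + pvE2 xs * y := by
  induction xs with
  | nil => simp [pvE2, pvE3]
  | cons a as ih => simp [pvE2, pvE3, pvE2_append, ih]; ring

theorem pvE2_short (xs : List Int) (h : xs.length ≤ 1) : pvE2 xs = 0 := by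
  match xs, h with
  | [], _ => rfl
  | [a], _ => simp [pvE2, pvE1]

theorem pvE3_short (xs : List Int) (h : xs.length ≤ 2) : pvE3 xs = 0 := by
  match xs, h with
  | [], _ => rfl
  | [a], _ => simp [pvE3, pvE2]
  | [a, b], _ => simp [pvE3, pvE2, pvE1]

-- B's step function (the lambda in task_6_2_f_alt, on the fetched element)
def pvStepB (st : Int × Int × Int) (x : Int) : Int × Int × Int :=
  (st.1 + x, st.2.1 + st.1 * x, st.2.2 + st.2.1 * x)

theorem pvB_fold (ys : List Int) :
    ∀ p : List Int,
      ys.foldl pvStepB (pvE1 p, pvE2 p, pvE3 p)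
        = (pvE1 (p ++ ys), pvE2 (p ++ ys), pvE3 (p ++ ys)) := by
  induction ys with
  | nil => intro p; simp
  | cons x xs ih =>
      intro p
      have h1 : pvE1 p + x = pvE1 (p ++ [x]) := by rw [pvE1_append]
      have h2 : pvE2 p + pvE1 p * x = pvE2 (p ++ [x]) := by rw [pvE2_append]
      have h3 : pvE3 p + pvE2 p * x = pvE3 (p ++ [x]) := by rw [pvE3_append]
      simp only [List.foldl_cons, pvStepB, h1, h2, h3, ih (p ++ [x])]
      simp

theorem pvTake_getD (nums : List Int) (L t : Nat) (ht : t < L) (_hL : L ≤ nums.length) :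
    (nums.take L).getD t 0 = nums.getD t 0 := by
  rw [List.getD_eq_getElem?_getD, List.getD_eq_getElem?_getD, List.getElem?_take]
  simp [ht]

-- range-indexed map into the prefix
theorem pvMap_take (nums : List Int) (m : Nat) (h : m ≤ nums.length) :
    (PySem.List.pyRange 0 (m : Int) 1).map (fun j => PySem.List.pyGetD nums j 0)
      = nums.take m := by
  induction m with
  | zero => simp
  | succ k ih =>
      have hk : k ≤ nums.length := Nat.le_of_succ_le h
      have hklt : k < nums.length := h
      have hcast : ((k + 1 : Nat) : Int) = (k : Int) + 1 := by push_cast; ring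
      rw [hcast, PySem.List.pyRange_one_succ_right (by positivity)]
      rw [List.map_append, ih hk]
      have hget : PySem.List.pyGetD nums (k : Int) 0 = nums[k] := by
        rw [PySem.List.pyGetD_natCast]
        exact List.getD_eq_getElem nums 0 hklt
      rw [List.take_add_one, List.getElem?_eq_getElem hklt]
      simp [hget]

-- fold of additions is init + sum
theorem pvFoldl_add (l : List Nat) (f : Nat → Int) :
    ∀ init : Int, l.foldl (fun acc k => acc + f k) init = init + (l.map f).sum := by
  induction l with
  | nil => intro init; simp
  | cons a as ih => intro init; simp [ih]; ring

-- the head-recursive e3 as a sum over l of zs[l] * e2(suffix after l)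
theorem pvE3_sum (zs : List Int) :
    ((List.range zs.length).map (fun k => zs.getD k 0 * pvE2 (zs.drop (k + 1)))).sum
      = pvE3 zs := by
  induction zs with
  | nil => simp [pvE3]
  | cons x xs ih =>
      rw [List.length_cons, List.range_succ_eq_map]
      simp only [List.map_cons, List.map_map, List.sum_cons]
      have hmap : (List.range xs.length).map
          ((fun k => (x :: xs).getD k 0 * pvE2 ((x :: xs).drop (k + 1))) ∘ Nat.succ)
          = (List.range xs.length).map (fun k => xs.getD k 0 * pvE2 (xs.drop (k + 1))) := by
        apply List.map_congr_left
        intro k _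
        simp [Function.comp]
      rw [hmap, ih]
      simp [pvE3]

-- getD after set
theorem pvGetD_set (l : List Int) (i j : Nat) (a d : Int) (hi : i < l.length) :
    (l.set i a).getD j d = if i = j then a else l.getD j d := by
  rw [List.getD_eq_getElem?_getD, List.getElem?_set]
  split_ifs with hij
  · simp
  · rw [List.getD_eq_getElem?_getD]

-- step function of A's first loop (the lambda in task_6_2_f)
def pvStepA (nums : List Int) (st : List Int × Int) (i : Int) : List Int × Int :=
  (PySem.List.pySetD st.1 i
      (st.2 * PySem.List.pyGetD nums i 0 + PySem.List.pyGetD st.1 (i + 1) 0),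
   st.2 + PySem.List.pyGetD nums i 0)

-- invariant of A's first (descending) loop
theorem pvLoop1 (nums : List Int) (L : Nat) (hL : L ≤ nums.length) :
    ∀ (j : Nat) (suff : List Int), j + 2 ≤ L → suff.length = L →
      (∀ t : Nat, j < t → t < L → suff.getD t 0 = pvE2 ((nums.take L).drop t)) →
      (((PySem.List.pyRange (j : Int) 0 (-1)).foldl (pvStepA nums)
          (suff, pvE1 ((nums.take L).drop (j + 1)))).1.length = L ∧
       ∀ t : Nat, 0 < t → t < L →
        ((PySem.List.pyRange (j : Int) 0 (-1)).foldl (pvStepA nums)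
          (suff, pvE1 ((nums.take L).drop (j + 1)))).1.getD t 0
          = pvE2 ((nums.take L).drop t)) := by
  intro j
  induction j with
  | zero =>
      intro suff _ hlen hinv
      rw [PySem.List.pyRange_neg_one_eq_nil (by norm_num)]
      exact ⟨hlen, fun t ht htL => hinv t ht htL⟩
  | succ k ih =>
      intro suff hjL hlen hinv
      set ys := nums.take L with hys
      have hyslen : ys.length = L := by simp [hys, Nat.min_eq_left hL]
      have hcast : ((k + 1 : Nat) : Int) = (k : Int) + 1 := by push_cast; ring
      rw [hcast, PySem.List.pyRange_neg_one_cons (by positivity)]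
      have hm1 : (k : Int) + 1 - 1 = (k : Int) := by ring
      rw [hm1, List.foldl_cons]
      have hk1L : k + 1 < L := by omega
      have hk2L : k + 2 < L := by omega
      have hget : PySem.List.pyGetD nums ((k : Int) + 1) 0 = ys.getD (k + 1) 0 := by
        have hc : ((k : Int) + 1) = ((k + 1 : Nat) : Int) := by push_cast; ring
        rw [hc, PySem.List.pyGetD_natCast, ← pvTake_getD nums L (k + 1) hk1L hL]
      have hsuffget : PySem.List.pyGetD suff ((k : Int) + 1 + 1) 0
          = pvE2 (ys.drop (k + 2)) := by
        have hc : ((k : Int) + 1 + 1) = ((k + 2 : Nat) : Int) := by push_cast; ring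
        rw [hc, PySem.List.pyGetD_natCast]
        exact hinv (k + 2) (by omega) hk2L
      have hdrop : ys.drop (k + 1) = ys.getD (k + 1) 0 :: ys.drop (k + 2) := by
        have h1 : k + 1 < ys.length := by omega
        rw [List.getD_eq_getElem _ _ h1]
        exact List.drop_eq_getElem_cons h1
      have hstep : pvStepA nums (suff, pvE1 (ys.drop (k + 1 + 1))) ((k : Int) + 1)
          = (suff.set (k + 1) (pvE2 (ys.drop (k + 1))), pvE1 (ys.drop (k + 1))) := by
        unfold pvStepA
        have hc : ((k : Int) + 1) = ((k + 1 : Nat) : Int) := by push_cast; ring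
        simp only [Prod.mk.injEq]
        constructor
        · rw [hc, PySem.List.pySetD_natCast, ← hc, hget, hsuffget]
          congr 1
          rw [hdrop]
          show pvE1 (ys.drop (k + 2)) * ys.getD (k + 1) 0 + pvE2 (ys.drop (k + 2))
              = ys.getD (k + 1) 0 * pvE1 (ys.drop (k + 2)) + pvE2 (ys.drop (k + 2))
          ring
        · rw [hget, hdrop]
          show pvE1 (ys.drop (k + 2)) + ys.getD (k + 1) 0
              = ys.getD (k + 1) 0 + pvE1 (ys.drop (k + 2))
          ring
      rw [hstep]
      exact ih (suff.set (k + 1) (pvE2 (ys.drop (k + 1)))) (by omega)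
        (by simpa using hlen)
        (by
          intro t ht htL
          rw [pvGetD_set suff (k + 1) t _ 0 (by omega)]
          by_cases hteq : k + 1 = t
          · subst hteq; simp
          · rw [if_neg hteq]
            exact hinv t (by omega) htL)

-- the tail terms of pvE3_sum vanish: the partial sum up to L-2 already equals e3
theorem pvE3_sum_partial (zs : List Int) :
    ((List.range (zs.length - 2)).map
        (fun k => zs.getD k 0 * pvE2 (zs.drop (k + 1)))).sum = pvE3 zs := by
  rcases Nat.lt_or_ge zs.length 2 with h2 | h2
  · have : zs.length - 2 = 0 := by omega
    rw [this]
    simp [pvE3_short zs (by omega)]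
  · set L := zs.length with hdL
    have h1 : L - 1 = (L - 2) + 1 := by omega
    have h0 : L = (L - 1) + 1 := by omega
    rw [← pvE3_sum]
    rw [show List.range L = List.range ((L-1)+1) from by rw [← h0], List.range_succ,
        show List.range (L-1) = List.range ((L-2)+1) from by rw [← h1], List.range_succ]
    have hz1 : pvE2 (zs.drop ((L - 2) + 1)) = 0 := by
      apply pvE2_short
      simp [List.length_drop]
      omega
    have hz2 : pvE2 (zs.drop ((L - 1) + 1)) = 0 := by
      apply pvE2_short
      simp [List.length_drop]
      omega
    rw [h1] at hz2
    simp only [List.map_append, List.map_cons, List.map_nil, List.sum_append, List.sum_cons,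
      List.sum_nil]
    rw [h1, hz1, hz2]
    ring

-- B's port equals e3 of the first n elements (closed-form characterisation)
theorem pvAlt_eq (n : Int) (nums : List Int) (hn : 0 ≤ n) (hlen : n ≤ (nums.length : Int)) :
    task_6_2_f_alt n nums = PySem.Int.mod (pvE3 (nums.take n.toNat)) 1000000007 := by
  simp only [task_6_2_f_alt]
  have hcast : n = ((n.toNat : Nat) : Int) := by omega
  have hfold : (PySem.List.pyRange 0 n 1).foldl
      (fun st i =>
        let x := PySem.List.pyGetD nums i 0
        (st.1 + x, st.2.1 + st.1 * x, st.2.2 + st.2.1 * x)) ((0 : Int), (0 : Int), (0 : Int))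
      = (nums.take n.toNat).foldl pvStepB (0, 0, 0) := by
    rw [← pvMap_take nums n.toNat (by omega), ← hcast, List.foldl_map]
    rfl
  rw [hfold]
  have hinit : ((0 : Int), (0 : Int), (0 : Int)) = (pvE1 [], pvE2 [], pvE3 []) := by
    simp [pvE1, pvE2, pvE3]
  rw [hinit, pvB_fold (nums.take n.toNat) []]
  simp

-- ===== VERDICT (by name: the statement is the Claim_ definition above) =====
theorem task_6_2_f_spec : Claim_equal_task_6_2_f := by
  intro n nums _ hpre
  unfold Pre_task_6_2_f PySem.Raise.InRange at hpre
  unfold Spec_task_6_2_f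
  rcases Int.lt_or_le n 1 with hn | hn
  · -- n ≤ 0: both programs' loops are empty and both return 0
    simp only [task_6_2_f, task_6_2_f_alt]
    rw [PySem.List.pyRange_neg_one_eq_nil (by omega), PySem.List.pyRange_one_eq_nil (by omega),
        PySem.List.pyRange_one_eq_nil (by omega)]
    simp
  · -- 1 ≤ n: both equal e3 of the first n elements, mod M
    have hnlen : n ≤ (nums.length : Int) := by omega
    rw [pvAlt_eq n nums (by omega) hnlen]
    set L := n.toNat with hdL
    have hLlen : L ≤ nums.length := by omega
    have hL1 : 1 ≤ L := by omega
    set ys := nums.take L with hys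
    have hyslen : ys.length = L := by simp [hys, Nat.min_eq_left hLlen]
    simp only [task_6_2_f]
    rcases Nat.lt_or_ge L 2 with hL2 | hL2
    · -- n = 1: both loops empty, e3 of a single element is 0
      have hn1 : n = 1 := by omega
      subst hn1
      rw [PySem.List.pyRange_neg_one_eq_nil (by omega), PySem.List.pyRange_one_eq_nil (by omega)]
      simp [pvE3_short ys (by omega)]
    · -- n ≥ 2: run the loop invariant, then sum up
      have hcastn : n = ((L : Nat) : Int) := by omega
      have hsumm : PySem.List.pyGetD nums (n - 1) 0 = pvE1 (ys.drop ((L - 2) + 1)) := by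
        have hc : n - 1 = ((L - 1 : Nat) : Int) := by omega
        have hlt : L - 1 < ys.length := by omega
        have hdrop : ys.drop (L - 1) = [ys[L - 1]] := by
          rw [List.drop_eq_getElem_cons hlt]
          congr 1
          apply List.drop_eq_nil_of_le
          omega
        rw [hc, PySem.List.pyGetD_natCast, show (L - 2) + 1 = L - 1 from by omega, hdrop]
        show nums.getD (L - 1) 0 = ys[L - 1] + pvE1 []
        rw [← pvTake_getD nums L (L - 1) (by omega) hLlen, ← hys,
            List.getD_eq_getElem _ _ hlt]
        simp [pvE1]
      have hrange1 : PySem.List.pyRange (n - 2) 0 (-1)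
          = PySem.List.pyRange ((L - 2 : Nat) : Int) 0 (-1) := by
        congr 1
        omega
      have hinit : (∀ t : Nat, L - 2 < t → t < L →
          (List.replicate n.toNat (0 : Int)).getD t 0 = pvE2 (ys.drop t)) := by
        intro t ht htL
        have : pvE2 (ys.drop t) = 0 := by
          apply pvE2_short
          simp [List.length_drop]
          omega
        rw [this]
        have htn : (t : Int) < n := by omega
        simp [List.getD_eq_getElem?_getD, htn]
      have hrep : (List.replicate n.toNat (0 : Int)).length = L := by simp [hdL]
      have hloop := pvLoop1 nums L hLlen (L - 2) (List.replicate n.toNat 0)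
        (by omega) hrep (by rw [← hys]; exact hinit)
      rw [← hys] at hloop
      -- rewrite A's first fold using the invariant
      rw [hrange1, hsumm]
      rw [show (fun (st : List Int × Int) (i : Int) =>
          (PySem.List.pySetD st.1 i
              (st.2 * PySem.List.pyGetD nums i 0 + PySem.List.pyGetD st.1 (i + 1) 0),
           st.2 + PySem.List.pyGetD nums i 0)) = pvStepA nums from rfl]
      obtain ⟨hSlen, hS⟩ := hloop
      set S := ((PySem.List.pyRange ((L - 2 : Nat) : Int) 0 (-1)).foldl (pvStepA nums)
        (List.replicate n.toNat 0, pvE1 (ys.drop ((L - 2) + 1)))).1 with hSdef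
      -- second loop: fold as a sum over range (L-2)
      have hrange2 : PySem.List.pyRange 0 (n - 2) 1
          = List.map (fun k : Nat => (k : Int)) (List.range (L - 2)) := by
        rw [show n - 2 = ((L - 2 : Nat) : Int) from by omega]
        exact PySem.List.pyRange_zero_natCast (L - 2)
      rw [hrange2, List.foldl_map, pvFoldl_add]
      have hterm : List.map
          (fun k : Nat => PySem.List.pyGetD nums (k : Int) 0 * PySem.List.pyGetD S ((k : Int) + 1) 0)
          (List.range (L - 2))
          = List.map (fun k : Nat => ys.getD k 0 * pvE2 (ys.drop (k + 1))) (List.range (L - 2)) := by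
        apply List.map_congr_left
        intro k hk
        rw [List.mem_range] at hk
        have hkL : k < L := by omega
        have hk1L : k + 1 < L := by omega
        have h1 : PySem.List.pyGetD nums (k : Int) 0 = ys.getD k 0 := by
          rw [PySem.List.pyGetD_natCast, hys, pvTake_getD nums L k hkL hLlen]
        have h2 : PySem.List.pyGetD S ((k : Int) + 1) 0 = pvE2 (ys.drop (k + 1)) := by
          have hc : ((k : Int) + 1) = ((k + 1 : Nat) : Int) := by push_cast; ring
          rw [hc, PySem.List.pyGetD_natCast]
          exact hS (k + 1) (by omega) hk1L
        rw [h1, h2]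
      rw [hterm]
      have := pvE3_sum_partial ys
      rw [hyslen] at this
      rw [zero_add, this]
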